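-- pv_equiv track=rewrite | github.com/karthikmadarapu/COMP2152_Labs | Week06/Lab06.py | parse_nslookup
-- ===== SOURCE A (Python) =====
-- def parse_nslookup(output):
--     """Parse nslookup output and extract the resolved IP address."""
--     lines = output.strip().split("\n")
--     result = {"ip": "Not found", "status": "Failed"}
--
--     found_answer = False
--     for line in lines:
--         if "Non-authoritative answer" in line:
--             found_answer = True
--         if found_answer and "Address:" in line:
--             ip = line.split("Address:")[1].strip()
--             if ip and "." in ip:
--                 result["ip"] = ip
--                 result["status"] = "Success"
--                 break
--
--     # macOS sometimes prints "Address: 1.1.1.1" without the "Non-authoritative answer" marker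
--     if result["status"] == "Failed":
--         for line in lines:
--             if "Address:" in line:
--                 ip = line.split("Address:")[-1].strip()
--                 if ip and "." in ip:
--                     result["ip"] = ip
--                     result["status"] = "Success"
--                     break
--
--     return result
-- ===== SOURCE B (Python) =====
-- def parse_nslookup(output):
--     """Parse nslookup output and extract the resolved IP address.
--
--     Single pass: track a preferred candidate (first valid 'Address:' value
--     after the 'Non-authoritative answer' marker, via split(...)[1]) and a
--     fallback candidate (first valid 'Address:' value anywhere, via
--     split(...)[-1]) simultaneously, then pick preferred over fallback.
--     """
--     preferred = None
--     fallback = None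
--     seen_marker = False
--     for line in output.strip().split("\n"):
--         if "Non-authoritative answer" in line:
--             seen_marker = True
--         if "Address:" in line:
--             if seen_marker and preferred is None:
--                 cand = line.split("Address:")[1].strip()
--                 if cand and "." in cand:
--                     preferred = cand
--             if fallback is None:
--                 cand = line.split("Address:")[-1].strip()
--                 if cand and "." in cand:
--                     fallback = cand
--     ip = preferred if preferred is not None else fallback
--     if ip is None:
--         return {"ip": "Not found", "status": "Failed"}
--     return {"ip": ip, "status": "Success"}
-- ===== Notes on version B (the rewrite author's own statement) =====
-- stated objective: alternative
-- what changed: Replaces A's two sequential scans (marker-gated scan, then a retry scan over all lines) by one pass that maintains a preferred and a fallback candidate simultaneously and chooses between them at the end.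
import Mathlib
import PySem

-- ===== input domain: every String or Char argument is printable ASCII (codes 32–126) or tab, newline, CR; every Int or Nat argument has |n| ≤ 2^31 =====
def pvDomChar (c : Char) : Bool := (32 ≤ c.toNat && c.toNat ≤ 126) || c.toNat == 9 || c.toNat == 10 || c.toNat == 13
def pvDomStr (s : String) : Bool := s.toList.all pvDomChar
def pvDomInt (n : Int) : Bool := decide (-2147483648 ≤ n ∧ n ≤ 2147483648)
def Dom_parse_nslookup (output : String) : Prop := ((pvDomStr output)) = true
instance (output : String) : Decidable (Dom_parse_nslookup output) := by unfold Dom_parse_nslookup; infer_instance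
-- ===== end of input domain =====

-- B replaces A's two sequential scans by one pass maintaining a preferred and a
-- fallback candidate simultaneously (alternative decomposition, same cost).

-- shared line-level primitives (both Pythons compute these exact subexpressions)
def pvLines (output : String) : List String :=
  (PySem.Str.split? (PySem.Str.strip output) "\n").getD []
def pvAddr1 (l : String) : String :=
  PySem.Str.strip ((PySem.List.pyGet? ((PySem.Str.split? l "Address:").getD []) 1).getD "")
def pvAddrLast (l : String) : String :=
  PySem.Str.strip ((PySem.List.pyGet? ((PySem.Str.split? l "Address:").getD []) (-1)).getD "")
def pvValid (s : String) : Bool := (s != "") && PySem.Str.isIn "." s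

-- ===== PORT A =====
-- first loop: marker-gated scan with break
def pvLoopA1 : List String → Bool → Option String
  | [], _ => none
  | l :: ls, fa =>
    let fa' := if PySem.Str.isIn "Non-authoritative answer" l then true else fa
    if fa' && PySem.Str.isIn "Address:" l then
      let ip := pvAddr1 l
      if pvValid ip then some ip else pvLoopA1 ls fa'
    else pvLoopA1 ls fa'

-- second loop (only if the first failed): scan all lines, split(...)[-1]
def pvLoopA2 : List String → Option String
  | [] => none
  | l :: ls =>
    if PySem.Str.isIn "Address:" l then
      let ip := pvAddrLast l
      if pvValid ip then some ip else pvLoopA2 ls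
    else pvLoopA2 ls

def parse_nslookup (output : String) : List (String × String) :=
  match pvLoopA1 (pvLines output) false with
  | some ip => [("ip", ip), ("status", "Success")]
  | none =>
    match pvLoopA2 (pvLines output) with
    | some ip => [("ip", ip), ("status", "Success")]
    | none => [("ip", "Not found"), ("status", "Failed")]

-- ===== PORT B =====
-- single pass carrying (seen_marker, preferred, fallback)
def pvLoopB : List String → Bool → Option String → Option String → Option String × Option String
  | [], _, p, f => (p, f)
  | l :: ls, m, p, f =>
    let m' := if PySem.Str.isIn "Non-authoritative answer" l then true else m
    if PySem.Str.isIn "Address:" l then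
      let p' := if m' && p.isNone then
          (let c := pvAddr1 l; if pvValid c then some c else p)
        else p
      let f' := if f.isNone then
          (let c := pvAddrLast l; if pvValid c then some c else f)
        else f
      pvLoopB ls m' p' f'
    else pvLoopB ls m' p f

def parse_nslookup_alt (output : String) : List (String × String) :=
  let pf := pvLoopB (pvLines output) false none none
  match (match pf.1 with | some _ => pf.1 | none => pf.2) with
  | some ip => [("ip", ip), ("status", "Success")]
  | none => [("ip", "Not found"), ("status", "Failed")]

-- ===== PRECONDITION & SPEC =====
def Spec_parse_nslookup (output : String) (out : List (String × String)) : Prop := out = parse_nslookup_alt output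
instance (output : String) (out : List (String × String)) : Decidable (Spec_parse_nslookup output out) := by unfold Spec_parse_nslookup; infer_instance

-- ===== CLAIM (what is proved, stated in full; the proofs are below) =====
def Claim_equal_parse_nslookup : Prop := ∀ (output : String), Dom_parse_nslookup output → Spec_parse_nslookup output (parse_nslookup output)

-- ===== LEMMAS AND PROOFS =====

-- B's single pass computes exactly A's two loop results (orElse with the carried state)
lemma pvLoopB_eq (ls : List String) (m : Bool) (p f : Option String) :
    pvLoopB ls m p f =
      (p.orElse (fun _ => pvLoopA1 ls m), f.orElse (fun _ => pvLoopA2 ls)) := by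
  induction ls generalizing m p f with
  | nil => cases p <;> cases f <;> simp [pvLoopB, pvLoopA1, pvLoopA2]
  | cons l ls ih =>
    by_cases ha : PySem.Chars.isIn ['A','d','d','r','e','s','s',':'] l.toList = true <;>
      by_cases hn : PySem.Chars.isIn ['N','o','n','-','a','u','t','h','o','r','i','t','a','t','i','v','e',' ','a','n','s','w','e','r'] l.toList = true <;>
      cases p <;> cases f <;>
      cases m <;>
      by_cases h1 : pvValid (pvAddr1 l) = true <;>
      by_cases h2 : pvValid (pvAddrLast l) = true <;>
      simp [pvLoopB, pvLoopA1, pvLoopA2, ih, ha, hn, h1, h2]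

-- ===== VERDICT (by name: the statement is the Claim_ definition above) =====
theorem parse_nslookup_spec : Claim_equal_parse_nslookup := by
  intro output _
  unfold Spec_parse_nslookup parse_nslookup parse_nslookup_alt
  rw [pvLoopB_eq]
  cases h1 : pvLoopA1 (pvLines output) false <;>
    cases h2 : pvLoopA2 (pvLines output) <;> simp
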